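-- pv_equiv track=rewrite | github.com/liuzheng1990/python-tail-f | tail-f.py | get_start_idx_last_lines
-- ===== SOURCE A (Python) =====
-- def get_start_idx_last_lines(s_full, n=0):
--     """
--     Get the starting index of `s_full` for the last `n` lines.
--
--     If n <= 0 (default), returns -1.
--     """
--     if n <= 0:
--         return -1
--     idx = len(s_full) # points to the last character of `s_full`.
--     while n > 0 and idx >= 0:
--         idx = s_full.rfind('\n', 0, idx)
--         n -= 1
--     if idx < 0:
--         idx = -1
--     return idx
-- ===== SOURCE B (Python) =====
-- def get_start_idx_last_lines(s_full, n=0):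
--     """
--     Get the starting index of `s_full` for the last `n` lines.
--
--     If n <= 0 (default), returns -1.
--     """
--     if n <= 0:
--         return -1
--     positions = [i for i, c in enumerate(s_full) if c == '\n']
--     if len(positions) < n:
--         return -1
--     return positions[-n]
-- ===== Notes on version B (the rewrite author's own statement) =====
-- stated objective: alternative
-- what changed: Replaces A's loop of n backward rfind scans with a single forward pass that materialises the list of all newline offsets and then selects the n-th newline from the end by direct indexing.
import Mathlib
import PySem

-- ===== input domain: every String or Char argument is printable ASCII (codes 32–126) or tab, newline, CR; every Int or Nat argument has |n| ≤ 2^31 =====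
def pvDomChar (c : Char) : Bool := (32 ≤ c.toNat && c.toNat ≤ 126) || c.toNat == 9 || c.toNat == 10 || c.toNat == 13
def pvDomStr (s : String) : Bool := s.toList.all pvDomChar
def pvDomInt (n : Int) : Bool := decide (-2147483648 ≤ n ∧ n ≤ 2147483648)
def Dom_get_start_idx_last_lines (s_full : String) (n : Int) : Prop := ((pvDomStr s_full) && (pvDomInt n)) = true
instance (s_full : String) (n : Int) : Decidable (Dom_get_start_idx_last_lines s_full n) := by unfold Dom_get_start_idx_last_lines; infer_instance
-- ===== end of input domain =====

-- B replaces A's n repeated backward rfind scans by one forward pass building the list of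
-- newline offsets and an O(1) negative-index selection (objective: alternative algorithm).

-- ===== PORT A =====
-- the while loop of A: fuel = remaining n; each step idx = s_full.rfind('\n', 0, idx)
def pvLoopA (s_full : String) : Nat → Int → Int
  | 0, idx => idx
  | Nat.succ m, idx =>
    if 0 ≤ idx then pvLoopA s_full m (PySem.Str.rfindFrom s_full "\n" 0 (some idx)) else idx

def get_start_idx_last_lines (s_full : String) (n : Int) : Int :=
  if n ≤ 0 then -1
  else
    let idx := pvLoopA s_full n.toNat (PySem.Str.len s_full)
    if idx < 0 then -1 else idx

-- ===== PORT B =====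
def get_start_idx_last_lines_alt (s_full : String) (n : Int) : Int :=
  if n ≤ 0 then -1
  else
    let positions : List Int :=
      ((PySem.List.enumerate s_full.toList 0).filter (fun p => p.2 == '\n')).map Prod.fst
    if (positions.length : Int) < n then -1
    else PySem.List.pyGetD positions (-n) 0

-- ===== PRECONDITION & SPEC =====
def Spec_get_start_idx_last_lines (s_full : String) (n : Int) (out : Int) : Prop := out = get_start_idx_last_lines_alt s_full n
instance (s_full : String) (n : Int) (out : Int) : Decidable (Spec_get_start_idx_last_lines s_full n out) := by unfold Spec_get_start_idx_last_lines; infer_instance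

-- ===== CLAIM (what is proved, stated in full; the proofs are below) =====
def Claim_equal_get_start_idx_last_lines : Prop := ∀ (s_full : String) (n : Int), Dom_get_start_idx_last_lines s_full n → Spec_get_start_idx_last_lines s_full n (get_start_idx_last_lines s_full n)

-- ===== LEMMAS AND PROOFS =====

-- the list of newline offsets of cs, counting from a (B's comprehension, generalised start)
def pvPos (cs : List Char) (a : Int) : List Int :=
  ((PySem.List.enumerate cs a).filter (fun p => p.2 == '\n')).map Prod.fst

theorem pvPos_nil (a : Int) : pvPos [] a = [] := rfl

theorem pvPos_cons (c : Char) (cs : List Char) (a : Int) :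
    pvPos (c :: cs) a = (if c == '\n' then [a] else []) ++ pvPos cs (a + 1) := by
  by_cases h : c = '\n' <;> simp [pvPos, PySem.List.enumerate_cons, h]

theorem pvPos_append (xs ys : List Char) (a : Int) :
    pvPos (xs ++ ys) a = pvPos xs a ++ pvPos ys (a + xs.length) := by
  induction xs generalizing a with
  | nil => simp [pvPos_nil]
  | cons x xs ih =>
    simp [pvPos_cons, ih, List.append_assoc]
    ring_nf

theorem pvPos_mem {cs : List Char} {a x : Int} (h : x ∈ pvPos cs a) :
    a ≤ x ∧ x < a + cs.length := by
  induction cs generalizing a with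
  | nil => simp [pvPos_nil] at h
  | cons c cs ih =>
    rw [pvPos_cons] at h
    rcases List.mem_append.1 h with h | h
    · by_cases hc : (c == '\n') = true
      · rw [if_pos hc] at h
        simp only [List.mem_singleton] at h
        subst h
        refine ⟨le_refl _, ?_⟩
        simp only [List.length_cons]
        push_cast
        omega
      · rw [if_neg hc] at h
        simp at h
    · obtain ⟨h1, h2⟩ := ih h
      refine ⟨by omega, ?_⟩
      simp only [List.length_cons]
      push_cast
      omega

theorem pvPos_pairwise (cs : List Char) (a : Int) : (pvPos cs a).Pairwise (· < ·) := by
  induction cs generalizing a with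
  | nil => simp [pvPos_nil]
  | cons c cs ih =>
    rw [pvPos_cons]
    apply List.pairwise_append.2
    refine ⟨?_, ih (a + 1), ?_⟩
    · by_cases hc : c == '\n' <;> simp [hc]
    · intro x hx y hy
      have hy' := (pvPos_mem hy).1
      by_cases hc : c == '\n' <;> simp [hc] at hx
      omega

theorem pvPos_take {cs : List Char} {k : Nat} (hk : k ≤ cs.length) :
    pvPos (cs.take k) 0 = (pvPos cs 0).filter (fun x => decide (x < (k : Int))) := by
  conv_rhs => rw [← List.take_append_drop k cs]
  rw [pvPos_append, List.filter_append]
  have h1 : (pvPos (cs.take k) 0).filter (fun x => decide (x < (k : Int))) = pvPos (cs.take k) 0 := by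
    apply List.filter_eq_self.2
    intro x hx
    obtain ⟨h1x, h2x⟩ := pvPos_mem hx
    have hlen : ((cs.take k).length : Int) = k := by simp [hk]
    simp only [decide_eq_true_eq]
    omega
  have h2 : (pvPos (cs.drop k) (0 + (cs.take k).length)).filter (fun x => decide (x < (k : Int))) = [] := by
    apply List.filter_eq_nil_iff.2
    intro x hx
    have h1x := (pvPos_mem hx).1
    have hlen : ((cs.take k).length : Int) = k := by simp [hk]
    simp only [decide_eq_true_eq]
    omega
  rw [h1, h2, List.append_nil]

theorem pv_isPrefixOf_nl (l : List Char) :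
    List.isPrefixOf ['\n'] l = true ↔ l.head? = some '\n' := by
  cases l with
  | nil => simp [List.isPrefixOf]
  | cons c cs =>
    simp only [List.isPrefixOf, List.head?_cons, Option.some_inj, Bool.and_eq_true, beq_iff_eq,
      and_true]
    exact eq_comm

theorem pv_go_spec (cs : List Char) (k : Nat) :
    PySem.Chars.rfind.go cs ['\n'] k = ((pvPos (cs.take (k + 1)) 0).reverse)[0]?.getD (-1) := by
  induction k with
  | zero =>
    cases cs with
    | nil => simp [PySem.Chars.rfind.go, List.isPrefixOf, pvPos_nil]
    | cons c cs =>
      by_cases hc : c = '\n'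
      · subst hc
        simp [PySem.Chars.rfind.go, List.isPrefixOf, pvPos_cons, pvPos_nil]
      · have hc2 : ¬ ('\n' = c) := fun hcc => hc hcc.symm
        simp [PySem.Chars.rfind.go, List.isPrefixOf, hc, hc2, pvPos_cons, pvPos_nil]
  | succ j ih =>
    have hstep : PySem.Chars.rfind.go cs ['\n'] (j + 1) =
        if List.isPrefixOf ['\n'] (cs.drop (j + 1)) then (((j + 1 : Nat)) : Int)
        else PySem.Chars.rfind.go cs ['\n'] j := by
      rw [show j + 1 = Nat.succ j from rfl, PySem.Chars.rfind.go.eq_2]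
    rw [hstep]
    rw [List.take_add_one (l := cs) (i := j + 1), pvPos_append]
    by_cases h : cs[j + 1]? = some '\n'
    · obtain ⟨hlt, -⟩ := List.getElem?_eq_some_iff.1 h
      have hpre : List.isPrefixOf ['\n'] (cs.drop (j + 1)) = true := by
        rw [pv_isPrefixOf_nl, List.head?_eq_getElem?, List.getElem?_drop, Nat.add_zero, h]
      have hlen : (cs.take (j + 1)).length = j + 1 := by
        simp only [List.length_take]
        omega
      simp only [h, Option.toList_some, hpre, if_true]
      rw [pvPos_cons, pvPos_nil]
      simp [hlen]
    · have hpre : List.isPrefixOf ['\n'] (cs.drop (j + 1)) = false := by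
        rw [Bool.eq_false_iff, Ne, pv_isPrefixOf_nl, List.head?_eq_getElem?,
          List.getElem?_drop, Nat.add_zero]
        exact h
      rw [hpre]
      simp only [if_false, Bool.false_eq_true]
      rw [ih]
      cases h2 : cs[j + 1]? with
      | none => simp [pvPos_nil]
      | some c =>
        have hc : ¬ (c == '\n') := by
          simp only [beq_iff_eq]; intro hcc; exact h (by rw [h2, hcc])
        simp [pvPos_cons, pvPos_nil, hc]

theorem pv_rfind_spec (cs : List Char) :
    PySem.Chars.rfind cs ['\n'] = ((pvPos cs 0).reverse)[0]?.getD (-1) := by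
  cases cs with
  | nil => simp [PySem.Chars.rfind, PySem.Chars.rfind.go, List.isPrefixOf, pvPos_nil]
  | cons c cs =>
    show PySem.Chars.rfind.go (c :: cs) ['\n'] (c :: cs).length = _
    have : (c :: cs).length = cs.length + 1 := rfl
    rw [this, pv_go_spec]
    have : (c :: cs).take (cs.length + 1 + 1) = c :: cs := by
      apply List.take_of_length_le; simp
    rw [this]

theorem pv_rfindFrom_spec (cs : List Char) (e : Int) (he0 : 0 ≤ e) (heL : e ≤ cs.length) :
    PySem.Chars.rfindFrom cs ['\n'] 0 (some e) =
      (((pvPos cs 0).filter (fun x => decide (x < e))).reverse)[0]?.getD (-1) := by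
  have hnot : ¬ ((cs.length : Int) < e) := by omega
  have hnot2 : ¬ (e < (0 : Int)) := by omega
  have hstep : PySem.Chars.rfindFrom cs ['\n'] 0 (some e) =
      (if PySem.Chars.rfind (cs.take e.toNat) ['\n'] = -1 then -1
       else PySem.Chars.rfind (cs.take e.toNat) ['\n']) := by
    simp only [PySem.Chars.rfindFrom]
    norm_num [hnot, hnot2]
  rw [hstep, pv_rfind_spec]
  have hk : e.toNat ≤ cs.length := by omega
  rw [pvPos_take hk]
  have hcast : ((e.toNat : Int)) = e := by omega
  rw [hcast]
  cases hrev : (((pvPos cs 0).filter (fun x => decide (x < e))).reverse)[0]? with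
  | none => simp
  | some r =>
    have hr : r ∈ pvPos cs 0 := by
      have : r ∈ ((pvPos cs 0).filter (fun x => decide (x < e))).reverse :=
        List.mem_of_getElem? hrev
      exact List.mem_of_mem_filter (List.mem_reverse.1 this)
    have hr0 : 0 ≤ r := (pvPos_mem hr).1
    simp only [Option.getD_some]
    rw [if_neg (by omega : ¬ r = -1)]

-- the one-step peel of a sorted filter: if filter (< idx) l = q ++ [r], then filter (< r) l = q
theorem pv_sorted_filter_peel {l : List Int} (hl : l.Pairwise (· < ·)) {idx r : Int}
    {q : List Int} (h : l.filter (fun x => decide (x < idx)) = q ++ [r]) :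
    l.filter (fun x => decide (x < r)) = q := by
  have hrmem : r ∈ l.filter (fun x => decide (x < idx)) := by rw [h]; simp
  have hrl : r ∈ l := List.mem_of_mem_filter hrmem
  have hrIdx : r < idx := by
    have := List.of_mem_filter hrmem; simpa using this
  have hpw : (q ++ [r]).Pairwise (· < ·) := by rw [← h]; exact hl.filter _
  have hq : ∀ x ∈ q, x < r := by
    intro x hx
    exact (List.pairwise_append.1 hpw).2.2 x hx r (by simp)
  have h1 : l.filter (fun x => decide (x < r)) =
      (l.filter (fun x => decide (x < idx))).filter (fun x => decide (x < r)) := by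
    rw [List.filter_filter]
    apply List.filter_congr
    intro x _
    by_cases hx : x < r
    · have hxi : x < idx := by omega
      simp [hx, hxi]
    · simp [hx]
  rw [h1, h, List.filter_append]
  have h2 : List.filter (fun x => decide (x < r)) q = q :=
    List.filter_eq_self.2 (fun x hx => by simpa using hq x hx)
  simp [h2]

theorem pvLoopA_neg (s : String) (m : Nat) {i : Int} (hi : i < 0) :
    pvLoopA s m i = i := by
  cases m with
  | zero => rfl
  | succ m =>
    have h : ¬ (0 ≤ i) := by omega
    simp [pvLoopA, h]

theorem pvLoopA_spec (s : String) (m : Nat) :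
    ∀ idx : Int, 0 ≤ idx → idx ≤ s.toList.length →
      pvLoopA s (m + 1) idx =
        ((((pvPos s.toList 0).filter (fun x => decide (x < idx))).reverse)[m]?).getD (-1) := by
  induction m with
  | zero =>
    intro idx h0 hL
    show (if 0 ≤ idx then pvLoopA s 0 (PySem.Str.rfindFrom s "\n" 0 (some idx)) else idx) = _
    rw [if_pos h0]
    show PySem.Str.rfindFrom s "\n" 0 (some idx) = _
    rw [PySem.Str.rfindFrom_eq, show ("\n".toList) = ['\n'] from rfl]
    exact pv_rfindFrom_spec s.toList idx h0 hL
  | succ m ih =>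
    intro idx h0 hL
    show (if 0 ≤ idx then pvLoopA s (m + 1) (PySem.Str.rfindFrom s "\n" 0 (some idx)) else idx) = _
    rw [if_pos h0, PySem.Str.rfindFrom_eq, show ("\n".toList) = ['\n'] from rfl,
      pv_rfindFrom_spec s.toList idx h0 hL]
    cases hrev : ((pvPos s.toList 0).filter (fun x => decide (x < idx))).reverse with
    | nil => simp [pvLoopA_neg s (m + 1) (by norm_num : (-1 : Int) < 0)]
    | cons r₀ R' =>
      have hr₀mem : r₀ ∈ pvPos s.toList 0 := by
        have : r₀ ∈ ((pvPos s.toList 0).filter (fun x => decide (x < idx))).reverse := by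
          rw [hrev]; simp
        exact List.mem_of_mem_filter (List.mem_reverse.1 this)
      have hb := pvPos_mem hr₀mem
      have hr₀0 : 0 ≤ r₀ := hb.1
      have hr₀L : r₀ ≤ s.toList.length := by have := hb.2; omega
      have hQ : (pvPos s.toList 0).filter (fun x => decide (x < idx)) = R'.reverse ++ [r₀] := by
        have := congrArg List.reverse hrev
        simpa using this
      have hpeel := pv_sorted_filter_peel (pvPos_pairwise s.toList 0) hQ
      simp only [List.getElem?_cons_zero, Option.getD_some]
      rw [ih r₀ hr₀0 hr₀L, hpeel]
      simp

theorem get_start_idx_last_lines_spec : Claim_equal_get_start_idx_last_lines := by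
  intro s n _
  unfold Spec_get_start_idx_last_lines get_start_idx_last_lines get_start_idx_last_lines_alt
  by_cases hn : n ≤ 0
  · simp [hn]
  · rw [if_neg hn, if_neg hn]
    have hn1 : 1 ≤ n := by omega
    set P : List Int := pvPos s.toList 0 with hP
    have hPdef : ((PySem.List.enumerate s.toList 0).filter (fun p => p.2 == '\n')).map Prod.fst = P := rfl
    rw [hPdef]
    have hfuel : n.toNat = (n.toNat - 1) + 1 := by omega
    have hlen : PySem.Str.len s = (s.toList.length : Int) := by
      simp [PySem.Str.len_eq]
    rw [hfuel, hlen]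
    rw [pvLoopA_spec s (n.toNat - 1) (s.toList.length : Int) (by positivity) (le_refl _)]
    have hfilter : P.filter (fun x => decide (x < (s.toList.length : Int))) = P := by
      apply List.filter_eq_self.2
      intro x hx
      have hb := (pvPos_mem (hP ▸ hx)).2
      simp only [decide_eq_true_eq]
      omega
    rw [hfilter]
    by_cases hlt : (P.length : Int) < n
    · rw [if_pos hlt]
      have hnone : (P.reverse)[n.toNat - 1]? = none := by
        apply List.getElem?_eq_none
        simp; omega
      rw [hnone]
      simp
    · rw [if_neg hlt]
      have hle : n.toNat ≤ P.length := by omega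
      have hidx : n.toNat - 1 < P.reverse.length := by simp; omega
      have hsome : (P.reverse)[n.toNat - 1]? = some (P.reverse[n.toNat - 1]) :=
        List.getElem?_eq_getElem hidx
      rw [hsome, Option.getD_some, List.getElem_reverse]
      have hneg : -n = -((n.toNat : Nat) : Int) := by omega
      rw [hneg, PySem.List.pyGetD_neg_natCast P n.toNat 0 (by omega) hle]
      have hval : P.length - 1 - (n.toNat - 1) = P.length - n.toNat := by omega
      simp only [hval]
      have hmem : P[P.length - n.toNat] ∈ P := List.getElem_mem _
      have h0 : 0 ≤ P[P.length - n.toNat] :=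
        (pvPos_mem (show P[P.length - n.toNat] ∈ pvPos s.toList 0 from hmem)).1
      rw [if_neg (by omega)]
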